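-- pv_equiv track=rewrite | github.com/RuzannaO/pyTraining | week0/Practice week0/Practice 1-6.py | my_funct
-- ===== SOURCE A (Python) =====
-- def my_funct(a, b):
--     def remove_dublicates(m):
--         return[m[x] for x in range(len(m)) if m[x] not in m[x+1:]]
--
--     new_string2 = remove_dublicates(b)
--     c = ""
--     for i in new_string2:
--         if i in a:
--             c += i * a.count(i)
--
--     return c
-- ===== SOURCE B (Python) =====
-- def my_funct(a, b):
--     # Index-table + sort: record each char's final index in b (dict overwrite),
--     # count a once, then emit chars ordered by that final index.
--     last = {}
--     for i, ch in enumerate(b):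
--         last[ch] = i
--     cnt = {}
--     for ch in a:
--         cnt[ch] = cnt.get(ch, 0) + 1
--     out = []
--     for ch in sorted(last, key=last.get):
--         if ch in cnt:
--             out.append(ch * cnt[ch])
--     return ''.join(out)
-- ===== Notes on version B (the rewrite author's own statement) =====
-- stated objective: faster
-- what changed: Replaces A's per-index suffix-membership dedup and per-character a.count scans with a last-index table built in one pass over enumerate(b), a count table built in one pass over a, and a sort of the distinct chars by their final index in b.
import Mathlib
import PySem

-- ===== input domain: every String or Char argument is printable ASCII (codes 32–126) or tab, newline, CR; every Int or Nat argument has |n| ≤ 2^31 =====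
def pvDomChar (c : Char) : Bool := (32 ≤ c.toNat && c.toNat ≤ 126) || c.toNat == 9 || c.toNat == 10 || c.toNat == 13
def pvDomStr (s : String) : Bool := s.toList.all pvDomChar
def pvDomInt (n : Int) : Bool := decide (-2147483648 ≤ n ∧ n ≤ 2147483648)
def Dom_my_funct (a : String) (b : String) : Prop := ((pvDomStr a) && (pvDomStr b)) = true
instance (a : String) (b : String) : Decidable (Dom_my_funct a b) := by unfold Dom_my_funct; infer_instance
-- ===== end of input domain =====

-- B replaces A's quadratic suffix-membership dedup and repeated a.count scans with a
-- last-index table over enumerate(b), a count table over a, and a sort of the distinct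
-- chars by final index (objective: faster).


-- ===== PORT A =====
-- 'i in a' / 'a.count(i)' with i a single character are ported element-wise
-- (contains / List.count), which is exact for one-character needles.
def my_funct (a : String) (b : String) : String :=
  String.mk
    (((PySem.List.pyRange 0 (b.toList.length : Int) 1).filterMap (fun x =>
        match PySem.List.pyGet? b.toList x with
        | some c =>
            if (PySem.List.slice b.toList (some (x + 1)) none).contains c then none else some c
        | none => none)).foldl
      (fun c i =>
        if a.toList.contains i then c ++ PySem.List.pyRepeat [i] ((a.toList.count i : Int))
        else c) [])

-- ===== PORT B =====
-- last = {}; for i, ch in enumerate(b): last[ch] = i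
def my_funct_last (b : String) : PySem.Dict Char Int :=
  (PySem.List.enumerate b.toList).foldl (fun d p => d.insert p.2 p.1) PySem.Dict.empty

-- cnt = {}; for ch in a: cnt[ch] = cnt.get(ch, 0) + 1
def my_funct_cnt (a : String) : PySem.Dict Char Int :=
  a.toList.foldl (fun d ch => d.insert ch (d.getD ch 0 + 1)) PySem.Dict.empty

-- sorted(last, key=last.get) — every key is in the dict, so last.get = getD _ 0 there
def my_funct_alt (a : String) (b : String) : String :=
  String.mk
    (((PySem.List.sorted (my_funct_last b).keys
        (fun ch => (my_funct_last b).getD ch 0) false).foldl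
      (fun out ch =>
        if (my_funct_cnt a).contains ch then
          out ++ [PySem.List.pyRepeat [ch] ((my_funct_cnt a).getD ch 0)]
        else out) ([] : List (List Char))).flatten)

-- ===== PRECONDITION & SPEC =====
def Spec_my_funct (a : String) (b : String) (out : String) : Prop := out = my_funct_alt a b
instance (a : String) (b : String) (out : String) : Decidable (Spec_my_funct a b out) := by unfold Spec_my_funct; infer_instance

-- ===== CLAIM (what is proved, stated in full; the proofs are below) =====
def Claim_equal_my_funct : Prop := ∀ (a : String) (b : String), Dom_my_funct a b → Spec_my_funct a b (my_funct a b)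

-- ===== LEMMAS AND PROOFS =====

-- A's comprehension keeps m[x] iff it does not recur later: that is Mathlib's List.dedup
-- (last occurrences, in order).
theorem pv_comp_eq_dedup (m : List Char) :
    (List.range m.length).filterMap (fun k =>
      match m[k]? with
      | some c => if (m.drop (k + 1)).contains c then none else some c
      | none => none) = m.dedup := by
  induction m with
  | nil => simp
  | cons c t ih =>
    rw [List.length_cons, List.range_succ_eq_map, List.filterMap_cons, List.filterMap_map]
    have htail :
        (List.filterMap ((fun k =>
          match (c :: t)[k]? with
          | some x => if ((c :: t).drop (k + 1)).contains x then none else some x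
          | none => none) ∘ Nat.succ) (List.range t.length)) = t.dedup := by
      rw [← ih]
      apply List.filterMap_congr
      intro k _
      simp [Function.comp]
    by_cases hc : c ∈ t
    · simp only [List.getElem?_cons_zero]
      rw [List.dedup_cons_of_mem hc]
      simpa [hc] using htail
    · simp only [List.getElem?_cons_zero]
      rw [List.dedup_cons_of_notMem hc]
      simpa [hc] using htail

-- proof-side name for B's last-index table over an explicit char list
def pvBuild (l : List Char) : PySem.Dict Char Int :=
  (PySem.List.enumerate l).foldl (fun d p => d.insert p.2 p.1) PySem.Dict.empty

theorem pv_build_eq (b : String) : my_funct_last b = pvBuild b.toList := rfl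

theorem pv_build_snoc (l : List Char) (c : Char) :
    pvBuild (l ++ [c]) = (pvBuild l).insert c (l.length : Int) := by
  unfold pvBuild
  rw [PySem.List.enumerate_append, List.foldl_append]
  simp [PySem.List.enumerate_cons, PySem.List.enumerate_nil]

theorem pv_mem_keys (l : List Char) (x : Char) : x ∈ (pvBuild l).keys ↔ x ∈ l := by
  induction l using List.reverseRecOn with
  | nil => simp [pvBuild, PySem.List.enumerate_nil, PySem.Dict.keys_empty]
  | append_singleton t c ih =>
    rw [pv_build_snoc, PySem.Dict.mem_keys_insert]
    simp [ih, or_comm]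

theorem pv_nodup_keys (l : List Char) : (pvBuild l).keys.Nodup := by
  unfold pvBuild
  exact PySem.Dict.nodup_keys_foldl_insert_key (PySem.List.enumerate l)
    (fun (p : Int × Char) => p.2) (fun (_ : PySem.Dict Char Int) (p : Int × Char) => p.1)
    PySem.Dict.empty PySem.Dict.nodup_keys_empty

theorem pv_getD_lt (l : List Char) (x : Char) (hx : x ∈ l) :
    0 ≤ (pvBuild l).getD x 0 ∧ (pvBuild l).getD x 0 < (l.length : Int) := by
  induction l using List.reverseRecOn with
  | nil => simp at hx
  | append_singleton t c ih =>
    rw [pv_build_snoc, PySem.Dict.getD_insert]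
    by_cases hxc : x = c
    · simp only [if_pos hxc, List.length_append, List.length_cons, List.length_nil]
      constructor <;> push_cast <;> omega
    · rw [if_neg hxc]
      have hxt : x ∈ t := by
        rcases List.mem_append.mp hx with h | h
        · exact h
        · simp at h; exact absurd h hxc
      obtain ⟨h1, h2⟩ := ih hxt
      refine ⟨h1, ?_⟩
      simp only [List.length_append, List.length_cons, List.length_nil]
      push_cast
      omega

theorem pv_dedup_snoc (l : List Char) (c : Char) :
    (l ++ [c]).dedup = (l.dedup.filter (fun x => x ≠ c)) ++ [c] := by
  induction l with
  | nil => simp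
  | cons a t ih =>
    by_cases hat : a ∈ t
    · have hmem : a ∈ t ++ [c] := List.mem_append.mpr (Or.inl hat)
      rw [List.cons_append, List.dedup_cons_of_mem hmem, ih,
        List.dedup_cons_of_mem hat]
    · by_cases hac : a = c
      · have hmem : a ∈ t ++ [c] := by simp [hac]
        rw [List.cons_append, List.dedup_cons_of_mem hmem, ih,
          List.dedup_cons_of_notMem hat, List.filter_cons]
        simp [hac]
      · have hmem : a ∉ t ++ [c] := by
          simp [hat, hac]
        rw [List.cons_append, List.dedup_cons_of_notMem hmem, ih,
          List.dedup_cons_of_notMem hat, List.filter_cons]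
        simp [hac]

theorem pv_pairwise (l : List Char) :
    l.dedup.Pairwise (fun x y => (pvBuild l).getD x 0 < (pvBuild l).getD y 0) := by
  induction l using List.reverseRecOn with
  | nil => simp
  | append_singleton t c ih =>
    rw [pv_dedup_snoc, pv_build_snoc]
    apply List.pairwise_append.mpr
    refine ⟨?_, by simp, ?_⟩
    · -- within the filtered old part: both keys ≠ c, lookups unchanged
      have h := List.Pairwise.filter (fun x => x ≠ c) ih
      apply List.Pairwise.imp_of_mem ?_ h
      intro x y hx hy hlt
      have hxc : x ≠ c := by simpa using (List.of_mem_filter hx)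
      have hyc : y ≠ c := by simpa using (List.of_mem_filter hy)
      rwa [PySem.Dict.getD_insert, PySem.Dict.getD_insert, if_neg hxc, if_neg hyc]
    · intro x hx y hy
      have hyc : y = c := by simpa using hy
      have hxc : x ≠ c := by simpa using (List.of_mem_filter hx)
      have hxl : x ∈ t := List.mem_dedup.mp (List.mem_of_mem_filter hx)
      rw [PySem.Dict.getD_insert, PySem.Dict.getD_insert, if_neg hxc, hyc, if_pos rfl]
      exact (pv_getD_lt t x hxl).2

theorem pv_sorted (l : List Char) :
    PySem.List.sorted (pvBuild l).keys (fun ch => (pvBuild l).getD ch 0) false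
      = l.dedup := by
  apply PySem.List.sorted_eq_of_perm_of_pairwise_lt
  · apply (List.perm_ext_iff_of_nodup (List.nodup_dedup l) (pv_nodup_keys l)).mpr
    intro x
    rw [List.mem_dedup, pv_mem_keys]
  · exact pv_pairwise l

theorem pv_foldl_snoc_map {α β : Type} (l : List α) (f : α → β) (s : List β) :
    l.foldl (fun acc x => acc ++ [f x]) s = s ++ l.map f := by
  induction l generalizing s with
  | nil => simp
  | cons x t ih => simp [List.foldl_cons, ih]

theorem my_funct_spec_aux (a b : String) : my_funct a b = my_funct_alt a b := by
  unfold my_funct my_funct_alt my_funct_cnt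
  -- normalise A's index comprehension to the Nat-range form, then to dedup
  have hrange :
      (PySem.List.pyRange 0 (b.toList.length : Int) 1).filterMap (fun x =>
        match PySem.List.pyGet? b.toList x with
        | some c => if (PySem.List.slice b.toList (some (x + 1)) none).contains c then none
                    else some c
        | none => none) = b.toList.dedup := by
    rw [PySem.List.pyRange_zero_nat, List.filterMap_map, ← pv_comp_eq_dedup b.toList]
    apply List.filterMap_congr
    intro k hk
    have h1 : PySem.List.pyGet? b.toList ((k : Nat) : Int) = b.toList[k]? :=
      PySem.List.pyGet?_natCast b.toList k
    have h2 : PySem.List.slice b.toList (some ((k : Int) + 1)) none =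
        b.toList.drop (k + 1) := by
      have := PySem.List.slice_from b.toList (a := (k : Int) + 1) (by positivity)
      simpa using this
    simp [Function.comp, h1, h2]
  rw [hrange]
  -- B's sorted key list is last-occurrence dedup of b
  rw [pv_build_eq, pv_sorted]
  -- B's count table is Counter(a)
  rw [PySem.Dict.foldl_insert_getD_add_one_eq_counter]
  -- A's guarded-append fold is filter + flatMap
  rw [PySem.List.foldl_if_eq_foldl_filter (fun i => a.toList.contains i)
        (fun c i => c ++ PySem.List.pyRepeat [i] ((a.toList.count i : Int))),
      PySem.List.foldl_append_eq_flatMap, List.nil_append]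
  -- B's guarded-append fold is filter + map, then flatten
  rw [PySem.List.foldl_if_eq_foldl_filter (fun ch => (PySem.Dict.counter a.toList).contains ch)
        (fun out ch => out ++ [PySem.List.pyRepeat [ch] ((PySem.Dict.counter a.toList).getD ch 0)]),
      pv_foldl_snoc_map, List.nil_append]
  rw [List.flatMap_def]
  have hfil : List.filter (fun i => a.toList.contains i) b.toList.dedup
      = List.filter (fun ch => (PySem.Dict.counter a.toList).contains ch) b.toList.dedup :=
    List.filter_congr (fun x _ => (PySem.Dict.contains_counter a.toList x).symm)
  have hmap : ∀ l : List Char,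
      List.map (fun i => PySem.List.pyRepeat [i] ((a.toList.count i : Int))) l
      = List.map (fun ch => PySem.List.pyRepeat [ch] ((PySem.Dict.counter a.toList).getD ch 0)) l := by
    intro l
    apply List.map_congr_left
    intro x _
    rw [PySem.Dict.getD_counter]
  rw [← hfil, hmap]

-- ===== VERDICT (by name: the statement is the Claim_ definition above) =====
theorem my_funct_spec : Claim_equal_my_funct := by
  intro a b _
  unfold Spec_my_funct
  exact my_funct_spec_aux a b
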